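-- pv_equiv track=rewrite | github.com/min-sys/rl-anything | scripts/lib/tool_usage_analyzer.py | _is_cat_replaceable
-- ===== SOURCE A (Python) =====
-- def _is_cat_replaceable(command: str) -> bool:
--     """cat コマンドが Read 代替可能かどうかを判定する。
--
--     heredoc (<<) やリダイレクト出力 (>, >>) がある場合は除外。
--     """
--     if "<<" in command:
--         return False
--     # リダイレクト出力の検出（> だが >> も含む、ただしパイプ後の > は含む）
--     # シンプルに: コマンド文字列に > が含まれ、それが stderr redirect (2>) でもパイプ後でもない場合
--     # → design の方針: シンプルな文字列マッチで十分
--     for i, ch in enumerate(command):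
--         if ch == ">" and i > 0 and command[i - 1] != "|" and command[i - 1] != "2":
--             return False
--         if ch == ">" and i == 0:
--             return False
--     return True
-- ===== SOURCE B (Python) =====
-- def _is_cat_replaceable(command: str) -> bool:
--     if "<<" in command:
--         return False
--     parts = command.split(">")
--     return all(p.endswith(("|", "2")) for p in parts[:-1])
-- ===== Notes on version B (the rewrite author's own statement) =====
-- stated objective: simpler
-- what changed: Instead of scanning characters by index and looking back at command[i-1], B splits the string on '>' and checks that every piece before a separator ends in '|' or '2'.
import Mathlib
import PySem

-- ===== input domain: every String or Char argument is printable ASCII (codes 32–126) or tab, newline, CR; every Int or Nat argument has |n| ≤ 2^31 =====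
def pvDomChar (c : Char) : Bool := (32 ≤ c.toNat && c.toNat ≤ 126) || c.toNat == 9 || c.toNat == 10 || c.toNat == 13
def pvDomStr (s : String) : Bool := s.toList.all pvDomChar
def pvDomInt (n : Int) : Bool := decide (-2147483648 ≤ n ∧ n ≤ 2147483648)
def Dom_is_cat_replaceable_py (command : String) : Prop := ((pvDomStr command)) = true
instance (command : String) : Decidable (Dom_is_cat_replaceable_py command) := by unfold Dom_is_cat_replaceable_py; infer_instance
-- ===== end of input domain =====

-- B replaces A's per-character index loop by splitting the string on '>' and
-- checking that every piece before a '>' ends in '|' or '2'; objective: simpler.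

-- ===== PORT A =====
-- the for loop over enumerate(command): index recursion over the character list
def pvALoop (s : List Char) (i : Nat) : Bool :=
  if h : i < s.length then
    let ch := s[i]
    if ch = '>' ∧ i > 0 ∧ s[i-1]? ≠ some '|' ∧ s[i-1]? ≠ some '2' then false
    else if ch = '>' ∧ i = 0 then false
    else pvALoop s (i+1)
  else true
termination_by s.length - i

def is_cat_replaceable_py (command : String) : Bool :=
  if PySem.Str.isIn "<<" command then false
  else pvALoop command.toList 0

-- ===== PORT B =====
-- command.split(">") on a one-character separator is List.splitOn '>' on the
-- code points; p.endswith(("|","2")) is the disjunction of the two endswith tests.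
def is_cat_replaceable_py_alt (command : String) : Bool :=
  if PySem.Str.isIn "<<" command then false
  else
    let parts := command.toList.splitOn '>'
    parts.dropLast.all (fun p => PySem.Chars.endswith p ['|'] || PySem.Chars.endswith p ['2'])

-- ===== PRECONDITION & SPEC =====
def Spec_is_cat_replaceable_py (command : String) (out : Bool) : Prop := out = is_cat_replaceable_py_alt command
instance (command : String) (out : Bool) : Decidable (Spec_is_cat_replaceable_py command out) := by unfold Spec_is_cat_replaceable_py; infer_instance

-- ===== CLAIM (what is proved, stated in full; the proofs are below) =====
def Claim_equal_is_cat_replaceable_py : Prop := ∀ (command : String), Dom_is_cat_replaceable_py command → Spec_is_cat_replaceable_py command (is_cat_replaceable_py command)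

-- ===== LEMMAS AND PROOFS =====

-- proof-side intermediate: a linear scan carrying the previous character
def pvNoBadGt (prev : Option Char) : List Char → Bool
  | [] => true
  | c :: rest =>
    if c = '>' ∧ prev ≠ some '|' ∧ prev ≠ some '2' then false
    else pvNoBadGt (some c) rest

-- is the character before a '>' acceptable?
def pvOk (o : Option Char) : Bool := o == some '|' || o == some '2'

-- pvF prev l: the scan's verdict expressed on the split pieces; prev is the
-- character preceding the first piece (none at the start of the string)
def pvF (prev : Option Char) : List (List Char) → Bool
  | [] => true
  | [_] => true
  | s :: rest => pvOk (s.getLast?.or prev) && pvF none rest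

-- the index loop from position i equals the prev-carrying scan on the suffix
theorem pvALoop_eq_noBadGt (s : List Char) (i : Nat) :
    pvALoop s i = pvNoBadGt (if i = 0 then none else s[i-1]?) (s.drop i) := by
  by_cases h : i < s.length
  · have hdrop : s.drop i = s[i] :: s.drop (i+1) := (List.getElem_cons_drop h).symm
    have hprev : s[i]? = some s[i] := List.getElem?_eq_getElem h
    have hrec := pvALoop_eq_noBadGt s (i+1)
    simp only [Nat.add_sub_cancel, hprev, Nat.succ_ne_zero, if_false] at hrec
    rw [pvALoop, dif_pos h, hdrop, pvNoBadGt, hrec]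
    by_cases hi : i = 0
    · subst hi
      simp only [reduceIte]
      clear hdrop hprev hrec
      split_ifs <;> simp_all
    · have hipos : i > 0 := Nat.pos_of_ne_zero hi
      have hprev1 : s[i-1]? = some s[i-1] :=
        List.getElem?_eq_getElem (show i - 1 < s.length by omega)
      simp only [if_neg hi, hprev1]
      clear hdrop hprev hrec
      split_ifs <;> simp_all
  · have hdrop : s.drop i = [] := List.drop_eq_nil_of_le (by omega)
    rw [pvALoop, dif_neg h, hdrop, pvNoBadGt]
termination_by s.length - i

theorem pvF_congr (p1 p2 : Option Char) (h : pvOk p1 = pvOk p2) (l : List (List Char)) :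
    pvF p1 l = pvF p2 l := by
  match l with
  | [] => rfl
  | [_] => rfl
  | s :: t :: rest =>
    cases hs : s.getLast? <;> simp [pvF, Option.or, hs, h]

theorem pvSplit_ne_nil (cs : List Char) : cs.splitOn '>' ≠ [] := by
  simp only [List.splitOn]
  exact List.splitOnP_ne_nil _ cs

theorem pvNoBadGt_eq_F (cs : List Char) (prev : Option Char) :
    pvNoBadGt prev cs = pvF prev (cs.splitOn '>') := by
  induction cs generalizing prev with
  | nil => rfl
  | cons c rest ih =>
    rw [pvNoBadGt]
    by_cases hc : c = '>'
    · subst hc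
      have hsplit : ('>' :: rest).splitOn '>' = [] :: rest.splitOn '>' := by
        simp [List.splitOn, List.splitOnP_cons]
      rw [hsplit]
      obtain ⟨s, t, ht⟩ : ∃ s t, rest.splitOn '>' = s :: t :=
        match h : rest.splitOn '>' with
        | [] => absurd h (pvSplit_ne_nil rest)
        | s :: t => ⟨s, t, rfl⟩
      rw [ht]
      show (if _ then false else pvNoBadGt (some '>') rest) = pvF prev ([] :: s :: t)
      have hF : pvF prev ([] :: s :: t) = (pvOk prev && pvF none (s :: t)) := rfl
      rw [hF]
      by_cases hok : pvOk prev = true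
      · have hp : ¬ (('>' : Char) = '>' ∧ prev ≠ some '|' ∧ prev ≠ some '2') := by
          simp only [pvOk, Bool.or_eq_true, beq_iff_eq] at hok
          rcases hok with h | h <;> simp [h]
        rw [if_neg hp, hok, Bool.true_and, ih, ht,
          pvF_congr (some '>') none (by simp [pvOk]) (s :: t)]
      · have hok' : pvOk prev = false := by simpa using hok
        have hp : (('>' : Char) = '>' ∧ prev ≠ some '|' ∧ prev ≠ some '2') := by
          refine ⟨rfl, ?_, ?_⟩ <;> intro hEq <;> rw [hEq] at hok' <;> simp [pvOk] at hok' 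
        rw [if_pos hp, hok', Bool.false_and]
    · have hsplit : (c :: rest).splitOn '>' = (rest.splitOn '>').modifyHead (c :: ·) := by
        simp [List.splitOn, List.splitOnP_cons, hc]
      obtain ⟨s, t, ht⟩ : ∃ s t, rest.splitOn '>' = s :: t :=
        match h : rest.splitOn '>' with
        | [] => absurd h (pvSplit_ne_nil rest)
        | s :: t => ⟨s, t, rfl⟩
      rw [if_neg (by simp [hc]), ih, ht, hsplit, ht, List.modifyHead]
      match t with
      | [] => rfl
      | u :: v =>
        show pvF (some c) (s :: u :: v) = pvF prev ((c :: s) :: u :: v)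
        have hlast : (c :: s).getLast?.or prev = s.getLast?.or (some c) := by
          cases s with
          | nil => simp [Option.or]
          | cons a b =>
            cases hb : (a :: b).getLast? with
            | none => simp at hb
            | some x => simp [List.getLast?_cons_cons, hb, Option.or]
        simp only [pvF, hlast]

-- pvF with no preceding character is B's "all pieces but the last end well"
theorem pvF_none_eq_all (l : List (List Char)) :
    pvF none l = l.dropLast.all (fun s => pvOk s.getLast?) := by
  match l with
  | [] => rfl
  | [_] => rfl
  | s :: t :: rest =>
    have := pvF_none_eq_all (t :: rest)
    simp [pvF, Option.or_none, this, List.dropLast]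

-- p.endswith(c) for a single character is a check of the last character
theorem pvEndswith_singleton (p : List Char) (c : Char) :
    PySem.Chars.endswith p [c] = (p.getLast? == some c) := by
  have h1 : PySem.Chars.endswith p [c] = true ↔ [c] <:+ p := PySem.Chars.endswith_iff p [c]
  have h2 : (p.getLast? == some c) = true ↔ [c] <:+ p := by
    rw [beq_iff_eq]
    constructor
    · intro h
      obtain ⟨q, rfl⟩ := List.getLast?_eq_some_iff.mp h
      exact ⟨q, rfl⟩
    · rintro ⟨q, rfl⟩
      simp [List.getLast?_append]
  cases hb : PySem.Chars.endswith p [c]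
  · cases hb2 : (p.getLast? == some c)
    · rfl
    · exact absurd (h1.mpr (h2.mp hb2)) (by simp [hb])
  · exact (h2.mpr (h1.mp hb)).symm

-- ===== VERDICT (by name: the statement is the Claim_ definition above) =====
theorem is_cat_replaceable_py_spec : Claim_equal_is_cat_replaceable_py := by
  intro command _
  unfold Spec_is_cat_replaceable_py is_cat_replaceable_py is_cat_replaceable_py_alt
  by_cases h : PySem.Str.isIn "<<" command = true
  · rw [if_pos h, if_pos h]
  · rw [if_neg h, if_neg h]
    show pvALoop command.toList 0 = _
    have h0 : pvALoop command.toList 0 = pvNoBadGt none (command.toList.drop 0) := by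
      simpa using pvALoop_eq_noBadGt command.toList 0
    rw [h0]
    simp only [List.drop_zero]
    rw [pvNoBadGt_eq_F, pvF_none_eq_all]
    simp [pvEndswith_singleton, pvOk]
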